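-- pv_equiv track=rewrite | github.com/wendelfrota/leetcode-problemset | easy/python/2423-equalize-frequency/main.py | equalFrequency
-- ===== SOURCE A (Python) =====
-- from collections import Counter
--
-- def equalFrequency(word: str) -> bool:
--     len_word = len(word)
--     set_word = set(word)
--
--     if len(set_word) == 1 or len(set_word) == len_word:
--         return True
--
--     freq = [0] * 26
--     for i in word:
--         freq[ord(i) - ord('a')] += 1
--
--     count = Counter(freq)
--     del count[0]
--
--     if len(count) != 2:
--         return False
--
--     key_min, key_max = min(count.keys()), max(count.keys())
--
--     if key_min == count[key_min] == 1:
--         return True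
--
--     return True if key_max - key_min == 1 and count[key_max] == 1 else False
-- ===== SOURCE B (Python) =====
-- def equalFrequency(word: str) -> bool:
--     if len(set(word)) <= 1 or len(set(word)) == len(word):
--         return True
--     freq = [0] * 26
--     for c in word:
--         freq[ord(c) - ord('a')] += 1
--     for i in range(26):
--         if freq[i] > 0:
--             rest = {f - 1 if j == i else f for j, f in enumerate(freq)}
--             rest.discard(0)
--             if len(rest) <= 1:
--                 return True
--     return False
-- ===== Notes on version B (the rewrite author's own statement) =====
-- stated objective: simpler
-- what changed: Keeps the trivial early exit but replaces A's frequency-of-frequencies Counter case analysis (distinct-value count, min/max keys, multiplicity tests) with a direct remove-one-occurrence simulation: for each letter present, decrement its count and check that the remaining nonzero counts are all equal.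
-- outside the precondition, e.g. on equalFrequency('GGGaa'): A returns False, B returns True
import Mathlib
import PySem

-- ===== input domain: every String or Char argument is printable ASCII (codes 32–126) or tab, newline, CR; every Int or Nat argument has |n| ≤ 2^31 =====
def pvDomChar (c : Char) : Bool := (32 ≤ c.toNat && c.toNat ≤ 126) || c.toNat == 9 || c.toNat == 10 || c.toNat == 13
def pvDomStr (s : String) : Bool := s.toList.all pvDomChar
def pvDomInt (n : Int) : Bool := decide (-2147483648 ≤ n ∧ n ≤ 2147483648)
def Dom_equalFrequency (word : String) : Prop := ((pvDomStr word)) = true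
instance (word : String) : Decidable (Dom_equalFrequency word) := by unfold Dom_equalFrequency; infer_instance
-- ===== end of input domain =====

-- B replaces A's frequency-of-frequencies Counter case analysis with a direct
-- remove-one-occurrence simulation over the letter counts (objective: simpler).


-- ===== PORT A =====
-- Both Pythons contain this identical counting loop: freq[ord(c) - ord('a')] += 1 on a
-- 26-element list.  pyGet?/pySetD are Python list indexing exactly (negative index counts
-- from the end); where Python raises IndexError (c outside 'G'..'z', excluded by Pre_)
-- pyGet? is none and the helper leaves freq unchanged.
def pvBump (freq : List Int) (c : Char) : List Int :=
  match PySem.List.pyGet? freq ((c.toNat : Int) - 97) with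
  | some v => PySem.List.pySetD freq ((c.toNat : Int) - 97) (v + 1)
  | none => freq

def pvFreq (cs : List Char) : List Int := cs.foldl pvBump (List.replicate 26 0)

-- A's tail: count = Counter(freq); del count[0] (Counter.__delitem__ ignores a missing 0);
-- the two-distinct-frequencies case analysis, as a function of freq
def pvCoreA (freq : List Int) : Bool :=
  let count := (PySem.Dict.counter freq).erase 0
  if count.size ≠ 2 then false
  else
    match PySem.List.min? count.keys (fun x => x), PySem.List.max? count.keys (fun x => x) with
    | some keyMin, some keyMax =>
        if keyMin = count.getD keyMin 0 ∧ count.getD keyMin 0 = 1 then true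
        else if keyMax - keyMin = 1 ∧ count.getD keyMax 0 = 1 then true
        else false
    | _, _ => false   -- unreachable: count.size = 2 makes keys nonempty

def equalFrequency (word : String) : Bool :=
  let lenWord := PySem.Str.len word
  let setWord : PySem.Set Char := PySem.Set.ofList word.toList
  if PySem.Set.len setWord = 1 ∨ PySem.Set.len setWord = lenWord then true
  else pvCoreA (pvFreq word.toList)

-- ===== PORT B =====
-- {f - 1 if j == i else f for j, f in enumerate(freq)} with 0 then discarded
def pvRest (freq : List Int) (i : Int) : PySem.Set Int :=
  PySem.Set.discard
    (PySem.Set.ofList ((PySem.List.enumerate freq).map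
      (fun jf => if jf.1 = i then jf.2 - 1 else jf.2))) 0

-- 'for i in range(26): …' (freq has 26 entries, so freq[i] is always in range)
def pvScan (freq : List Int) : List Int → Bool
  | [] => false
  | i :: is =>
      if 0 < PySem.List.pyGetD freq i 0 then
        if (pvRest freq i).length ≤ 1 then true else pvScan freq is
      else pvScan freq is

def equalFrequency_alt (word : String) : Bool :=
  let uniq := PySem.Set.len (PySem.Set.ofList word.toList)
  if uniq ≤ 1 ∨ uniq = PySem.Str.len word then true
  else pvScan (pvFreq word.toList) (PySem.List.pyRange 0 26 1)

-- ===== PRECONDITION & SPEC =====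
-- Pre_ admits every word over the problem's alphabet a-z, plus any word that hits the
-- early exit (at most one distinct character, or all characters distinct); it excludes the
-- remaining words with non-lowercase characters, on which both implementations index the
-- 26-array with ord(c)-97 and so raise IndexError (e.g. "aa!b") or wrap a negative index
-- around in non-matching ways (e.g. "GGGaa": A returns False, B True).
def Pre_equalFrequency (word : String) : Prop :=
  word.toList.all (fun c => 'a' ≤ c && c ≤ 'z') = true
  ∨ (PySem.Set.ofList word.toList).length ≤ 1
  ∨ (PySem.Set.ofList word.toList).length = word.toList.length
instance (word : String) : Decidable (Pre_equalFrequency word) := by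
  unfold Pre_equalFrequency; infer_instance

def pvWitness_equalFrequency : String := "aabbbb"

def Spec_equalFrequency (word : String) (out : Bool) : Prop := out = equalFrequency_alt word
instance (word : String) (out : Bool) : Decidable (Spec_equalFrequency word out) := by
  unfold Spec_equalFrequency; infer_instance

-- ===== CLAIM (what is proved, stated in full; the proofs are below) =====
def Claim_equal_equalFrequency : Prop := ∀ (word : String), Dom_equalFrequency word →
  Pre_equalFrequency word → Spec_equalFrequency word (equalFrequency word)

-- ===== LEMMAS AND PROOFS =====

-- the value-level reading of B's scan: some present count, decremented once, leaves all
-- remaining nonzero counts equal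
def pvBVal (L : List Int) : Prop :=
  ∃ v ∈ L, v ≠ 0 ∧ ∀ x ∈ (v - 1) :: L.erase v, ∀ y ∈ (v - 1) :: L.erase v,
    x ≠ 0 → y ≠ 0 → x = y

-- ---- the counting loop: pvFreq cs lists, per bin j, how often chr(97+j) occurs ----

lemma pvBump_length (acc : List Int) (c : Char) : (pvBump acc c).length = acc.length := by
  unfold pvBump
  cases h : PySem.List.pyGet? acc ((c.toNat : Int) - 97) with
  | none => rfl
  | some v => simp [PySem.List.length_pySetD]

lemma foldl_bump_length (cs : List Char) (acc : List Int) :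
    (cs.foldl pvBump acc).length = acc.length := by
  induction cs generalizing acc with
  | nil => rfl
  | cons c cs ih => rw [List.foldl_cons, ih, pvBump_length]

lemma pvBump_getD (acc : List Int) (hlen : acc.length = 26) (c : Char)
    (hc : 97 ≤ c.toNat ∧ c.toNat ≤ 122) (j : Nat) :
    (pvBump acc c).getD j 0 = acc.getD j 0 + (if c.toNat = 97 + j then 1 else 0) := by
  have hidx : ((c.toNat : Int) - 97) = ((c.toNat - 97 : Nat) : Int) := by omega
  have hlt : c.toNat - 97 < acc.length := by omega
  unfold pvBump
  rw [hidx, PySem.List.pyGet?_natCast]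
  rw [List.getElem?_eq_getElem hlt]
  simp only [PySem.List.pySetD_natCast]
  rw [List.getD_eq_getElem?_getD, List.getD_eq_getElem?_getD, List.getElem?_set]
  by_cases hij : c.toNat - 97 = j
  · rw [if_pos hij, if_pos (by omega), if_pos (by omega)]
    rw [List.getElem?_eq_getElem (by omega : j < acc.length)]
    simp only [Option.getD_some]
    have : acc[c.toNat - 97] = acc[j]'(by omega) := by congr 1
    rw [this]
  · rw [if_neg hij, if_neg (by omega)]
    simp

lemma foldl_bump_getD (cs : List Char) (acc : List Int) (hlen : acc.length = 26)
    (hpre : ∀ c ∈ cs, 'a' ≤ c ∧ c ≤ 'z') (j : Nat) (hj : j < 26) :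
    (cs.foldl pvBump acc).getD j 0
      = acc.getD j 0 + ((cs.countP (fun c => c.toNat = 97 + j)) : Int) := by
  induction cs generalizing acc with
  | nil => simp
  | cons c cs ih =>
    have hc : 97 ≤ c.toNat ∧ c.toNat ≤ 122 := by
      have := hpre c (List.mem_cons_self ..)
      obtain ⟨h1, h2⟩ := this
      rw [Char.le_def] at h1 h2
      exact ⟨h1, h2⟩
    rw [List.foldl_cons, ih (pvBump acc c) (by rw [pvBump_length]; exact hlen)
      (fun d hd => hpre d (List.mem_cons_of_mem _ hd)),
      pvBump_getD acc hlen c hc j, List.countP_cons]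
    by_cases h : c.toNat = 97 + j
    · rw [if_pos (by exact h), if_pos (by simpa using h)]; push_cast; ring
    · rw [if_neg (by exact h), if_neg (by simpa using h)]; push_cast; ring
lemma pvFreq_eq_map (cs : List Char) (hpre : ∀ c ∈ cs, 'a' ≤ c ∧ c ≤ 'z') :
    pvFreq cs = (List.range 26).map
      (fun j => ((cs.countP (fun c => c.toNat = 97 + j)) : Int)) := by
  have hlen : (pvFreq cs).length = 26 := by
    unfold pvFreq; rw [foldl_bump_length]; simp
  apply List.ext_getElem (by simp [hlen])
  intro i h1 h2
  have hi : i < 26 := by omega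
  have := foldl_bump_getD cs (List.replicate 26 0) (by simp) hpre i hi
  unfold pvFreq at *
  rw [List.getD_eq_getElem _ _ h1] at this
  rw [this]
  have hrep : (List.replicate 26 (0:Int)).getD i 0 = 0 := by
    rw [List.getD_eq_getElem _ _ (by simp [hi])]
    exact List.getElem_replicate ..
  rw [hrep]
  simp
lemma pvFreq_length (cs : List Char) : (pvFreq cs).length = 26 := by
  unfold pvFreq; rw [foldl_bump_length]; simp

lemma pvFreq_nonneg (cs : List Char) (hpre : ∀ c ∈ cs, 'a' ≤ c ∧ c ≤ 'z') :
    ∀ x ∈ pvFreq cs, 0 ≤ x := by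
  rw [pvFreq_eq_map cs hpre]
  intro x hx
  obtain ⟨j, _, rfl⟩ := List.mem_map.mp hx
  positivity

lemma pv_count_one (c : Char) (hc : 97 ≤ c.toNat ∧ c.toNat ≤ 122) :
    (List.range 26).countP (fun j => c.toNat = 97 + j) = 1 := by
  have h1 : (List.range 26).countP (fun j => c.toNat = 97 + j)
      = (List.range 26).count (c.toNat - 97) := by
    rw [List.count]
    apply List.countP_congr
    intro j hj
    simp only [decide_eq_true_eq, beq_iff_eq]
    omega
  rw [h1, List.count_eq_one_of_mem (List.nodup_range) (List.mem_range.mpr (by omega))]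

lemma pvFreq_sum (cs : List Char) (hpre : ∀ c ∈ cs, 'a' ≤ c ∧ c ≤ 'z') :
    (pvFreq cs).sum = (cs.length : Int) := by
  rw [pvFreq_eq_map cs hpre]
  induction cs with
  | nil => simp
  | cons c cs ih =>
    have hc : 97 ≤ c.toNat ∧ c.toNat ≤ 122 := by
      have := hpre c (List.mem_cons_self ..)
      obtain ⟨h1, h2⟩ := this
      rw [Char.le_def] at h1 h2
      exact ⟨h1, h2⟩
    have hmap : (List.range 26).map
        (fun j => (((c :: cs).countP (fun c => c.toNat = 97 + j)) : Int))
        = (List.range 26).map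
          (fun j => ((cs.countP (fun c' => c'.toNat = 97 + j)) : Int)
            + (if c.toNat = 97 + j then 1 else 0)) := by
      apply List.map_congr_left
      intro j _
      rw [List.countP_cons]
      by_cases h : c.toNat = 97 + j
      · rw [if_pos (by simpa using h), if_pos h]; push_cast; ring
      · rw [if_neg (by simpa using h), if_neg h]; push_cast; ring
    rw [hmap, PySem.List.sum_map_add_int, ih (fun d hd => hpre d (List.mem_cons_of_mem _ hd))]
    have hite : (List.map (fun j => if c.toNat = 97 + j then (1:Int) else 0) (List.range 26)).sum
        = (((List.range 26).countP (fun j => c.toNat = 97 + j) : Nat) : Int) := by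
      rw [show (fun j => if c.toNat = 97 + j then (1:Int) else 0)
          = (fun j => if (decide (c.toNat = 97 + j)) = true then (1:Int) else 0) from by
        funext j; simp]
      rw [PySem.List.sum_map_ite_one_zero]
    rw [hite, pv_count_one c hc]
    simp [Nat.cast_succ]
lemma pvFreq_distinct (cs : List Char) (hpre : ∀ c ∈ cs, 'a' ≤ c ∧ c ≤ 'z') :
    (PySem.Set.ofList cs).length = (pvFreq cs).countP (fun v => v ≠ 0) := by
  rw [pvFreq_eq_map cs hpre, List.countP_map]
  -- RHS = number of bins j < 26 with a positive count
  have hR : (List.range 26).countP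
        ((fun v => decide (v ≠ 0)) ∘ fun j => ((cs.countP (fun c => c.toNat = 97 + j)) : Int))
      = ((Finset.range 26).filter
          (fun j => cs.countP (fun c => c.toNat = 97 + j) ≠ 0)).card := by
    rw [List.countP_eq_length_filter]
    have hnd : ((List.range 26).filter
        ((fun v => decide (v ≠ 0)) ∘ fun j => ((cs.countP (fun c => c.toNat = 97 + j)) : Int))).Nodup :=
      (List.nodup_range).filter _
    rw [← List.toFinset_card_of_nodup hnd]
    congr 1
    apply Finset.ext
    intro j
    simp [Finset.mem_filter, Function.comp]
  rw [hR]
  -- LHS = number of distinct chars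
  have hL : (PySem.Set.ofList cs).length = cs.toFinset.card := by
    rw [← List.toFinset_card_of_nodup (PySem.Set.nodup_ofList cs)]
    congr 1
    apply Finset.ext
    intro c
    simp [PySem.Set.mem_ofList]
  rw [hL]
  -- bijection c ↦ c.toNat - 97
  apply Finset.card_bij (fun c _ => c.toNat - 97)
  · intro c hc
    have hcl : c ∈ cs := List.mem_toFinset.mp hc
    have hb : 97 ≤ c.toNat ∧ c.toNat ≤ 122 := by
      obtain ⟨h1, h2⟩ := hpre c hcl
      rw [Char.le_def] at h1 h2
      exact ⟨h1, h2⟩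
    refine Finset.mem_filter.mpr ⟨Finset.mem_range.mpr (by omega), ?_⟩
    have : 0 < cs.countP (fun c' => c'.toNat = 97 + (c.toNat - 97)) := by
      apply List.countP_pos_iff.mpr
      exact ⟨c, hcl, by simp; omega⟩
    omega
  · intro c1 h1 c2 h2 heq
    have hb1 : 97 ≤ c1.toNat := ((fun h => by rw [Char.le_def] at h; exact h) (hpre c1 (List.mem_toFinset.mp h1)).1)
    have hb2 : 97 ≤ c2.toNat := ((fun h => by rw [Char.le_def] at h; exact h) (hpre c2 (List.mem_toFinset.mp h2)).1)
    have : c1.toNat = c2.toNat := by omega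
    apply Char.ext
    exact UInt32.toNat_inj.mp this
  · intro j hj
    obtain ⟨hjr, hcnt⟩ := Finset.mem_filter.mp hj
    have : 0 < cs.countP (fun c => c.toNat = 97 + j) := Nat.pos_of_ne_zero hcnt
    obtain ⟨c, hcl, hcj⟩ := List.countP_pos_iff.mp this
    exact ⟨c, List.mem_toFinset.mpr hcl, by simp at hcj; omega⟩

-- ---- B's scan equals pvBVal ----

-- the scan succeeds iff some listed index does
lemma pvScan_iff_exists (L : List Int) (idxs : List Int) :
    pvScan L idxs = true ↔
      ∃ i ∈ idxs, 0 < PySem.List.pyGetD L i 0 ∧ (pvRest L i).length ≤ 1 := by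
  induction idxs with
  | nil => simp [pvScan]
  | cons i is ih =>
    unfold pvScan
    by_cases h1 : 0 < PySem.List.pyGetD L i 0
    · by_cases h2 : (pvRest L i).length ≤ 1
      · simp only [if_pos h1, if_pos h2]
        constructor
        · intro _; exact ⟨i, List.mem_cons_self .., h1, h2⟩
        · intro _; trivial
      · simp only [if_pos h1, if_neg h2, ih]
        constructor
        · rintro ⟨j, hj, hq⟩; exact ⟨j, List.mem_cons_of_mem _ hj, hq⟩
        · rintro ⟨j, hj, hq⟩
          rcases List.mem_cons.mp hj with rfl | hj'
          · exact absurd hq.2 h2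
          · exact ⟨j, hj', hq⟩
    · simp only [if_neg h1, ih]
      constructor
      · rintro ⟨j, hj, hq⟩; exact ⟨j, List.mem_cons_of_mem _ hj, hq⟩
      · rintro ⟨j, hj, hq⟩
        rcases List.mem_cons.mp hj with rfl | hj'
        · exact absurd hq.1 h1
        · exact ⟨j, hj', hq⟩

-- the comprehension behind pvRest is exactly L with entry i decremented
lemma pv_map_enumerate_set (L : List Int) (i : Nat) (hi : i < L.length) :
    (PySem.List.enumerate L).map (fun jf => if jf.1 = (i : Int) then jf.2 - 1 else jf.2)
      = L.set i (L[i] - 1) := by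
  apply List.ext_getElem (by simp [PySem.List.length_enumerate])
  intro k h1 h2
  have hk : k < L.length := by simpa [PySem.List.length_enumerate] using h1
  rw [List.getElem_map, PySem.List.getElem_enumerate L 0 k (by simpa [PySem.List.length_enumerate])]
  simp only [zero_add]
  rw [List.getElem_set]
  by_cases h : k = i
  · subst h; simp
  · rw [if_neg (by exact_mod_cast fun he => h (by exact_mod_cast he)), if_neg (fun he => h he.symm)]

-- a Nodup list has at most one element iff all members coincide
lemma pv_nodup_len_le_one {t : List Int} (hnd : t.Nodup) :
    t.length ≤ 1 ↔ ∀ x ∈ t, ∀ y ∈ t, x = y := by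
  cases t with
  | nil => simp
  | cons a t' =>
    cases t' with
    | nil => simp
    | cons b t'' =>
      simp only [List.nodup_cons, List.mem_cons] at hnd
      constructor
      · intro h
        exfalso
        simp only [List.length_cons] at h
        omega
      · intro h
        exact absurd (h a (by simp) b (by simp)) (fun he => hnd.1 (Or.inl he))

-- |rest| ≤ 1 iff the nonzero entries of the decremented list are all equal
lemma pvRest_iff (M : List Int) :
    ((PySem.Set.discard (PySem.Set.ofList M) 0).length ≤ 1)
      ↔ ∀ x ∈ M, ∀ y ∈ M, x ≠ 0 → y ≠ 0 → x = y := by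
  have hnd : (PySem.Set.discard (PySem.Set.ofList M) 0).Nodup := by
    unfold PySem.Set.discard
    exact (PySem.Set.nodup_ofList M).filter _
  have hmem : ∀ x, x ∈ PySem.Set.discard (PySem.Set.ofList M) 0 ↔ (x ∈ M ∧ x ≠ 0) := by
    intro x
    unfold PySem.Set.discard
    rw [List.mem_filter, PySem.Set.mem_ofList]
    simp
  rw [pv_nodup_len_le_one hnd]
  constructor
  · intro h x hx y hy hx0 hy0
    exact h x ((hmem x).mpr ⟨hx, hx0⟩) y ((hmem y).mpr ⟨hy, hy0⟩)
  · intro h x hx y hy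
    obtain ⟨hx1, hx0⟩ := (hmem x).mp hx
    obtain ⟨hy1, hy0⟩ := (hmem y).mp hy
    exact h x hx1 y hy1 hx0 hy0

-- members of L.set i (v-1) are v-1 together with those of L.erase L[i]
lemma pv_mem_set_iff (L : List Int) (i : Nat) (hi : i < L.length) (x : Int) :
    x ∈ L.set i (L[i] - 1) ↔ x = L[i] - 1 ∨ x ∈ L.erase L[i] := by
  have hdec : L.set i (L[i] - 1) = L.take i ++ (L[i] - 1) :: L.drop (i + 1) := by
    rw [List.set_eq_take_append_cons_drop, if_pos hi]
  have hL : L = L.take i ++ L[i] :: L.drop (i + 1) := by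
    conv_lhs => rw [← List.take_append_drop i L, List.drop_eq_getElem_cons hi]
  have hperm : (L[i] :: (L.take i ++ L.drop (i + 1))).Perm L := by
    conv_rhs => rw [hL]
    exact List.perm_middle.symm
  have herase : (L.take i ++ L.drop (i + 1)).Perm (L.erase L[i]) :=
    (List.cons_perm_iff_perm_erase.mp hperm).2
  rw [hdec]
  constructor
  · intro hx
    rcases List.mem_append.mp hx with h | h
    · exact Or.inr (herase.mem_iff.mp (List.mem_append.mpr (Or.inl h)))
    · rcases List.mem_cons.mp h with h | h
      · exact Or.inl h
      · exact Or.inr (herase.mem_iff.mp (List.mem_append.mpr (Or.inr h)))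
  · intro hx
    rcases hx with rfl | hx
    · exact List.mem_append.mpr (Or.inr (List.mem_cons_self ..))
    · rcases List.mem_append.mp (herase.mem_iff.mpr hx) with h | h
      · exact List.mem_append.mpr (Or.inl h)
      · exact List.mem_append.mpr (Or.inr (List.mem_cons_of_mem _ h))

lemma pvScan_iff (L : List Int) (h0 : ∀ x ∈ L, 0 ≤ x) (hL : L.length = 26) :
    pvScan L (PySem.List.pyRange 0 26 1) = true ↔ pvBVal L := by
  rw [pvScan_iff_exists]
  constructor
  · rintro ⟨i, hi, hpos, hrest⟩
    obtain ⟨h0i, hi26⟩ := PySem.List.mem_pyRange_one.mp hi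
    have hiN : i.toNat < L.length := by omega
    have hgd : PySem.List.pyGetD L i 0 = L[i.toNat] := by
      unfold PySem.List.pyGetD
      rw [PySem.List.pyGet?_of_nonneg _ h0i, List.getElem?_eq_getElem hiN]
      rfl
    have hiI : ((i.toNat : Nat) : Int) = i := by omega
    refine ⟨L[i.toNat], List.getElem_mem hiN, by rw [hgd] at hpos; omega, ?_⟩
    intro x hx y hy hx0 hy0
    unfold pvRest at hrest
    have hset := pv_map_enumerate_set L i.toNat hiN
    rw [hiI] at hset
    rw [hset] at hrest
    have := (pvRest_iff _).mp hrest
    apply this x _ y _ hx0 hy0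
    · exact (pv_mem_set_iff L i.toNat hiN x).mpr (by simpa using List.mem_cons.mp hx)
    · exact (pv_mem_set_iff L i.toNat hiN y).mpr (by simpa using List.mem_cons.mp hy)
  · rintro ⟨v, hv, hv0, huni⟩
    obtain ⟨i, hiN, hvi⟩ := List.getElem_of_mem hv
    subst hvi
    refine ⟨(i : Int), PySem.List.mem_pyRange_one.mpr ⟨by positivity, by exact_mod_cast by omega⟩, ?_, ?_⟩
    · have hgd : PySem.List.pyGetD L (i : Int) 0 = L[i] := by
        unfold PySem.List.pyGetD
        rw [PySem.List.pyGet?_natCast]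
        rw [List.getElem?_eq_getElem hiN]
        rfl
      rw [hgd]
      have := h0 _ hv
      omega
    · unfold pvRest
      rw [pv_map_enumerate_set L i hiN]
      rw [pvRest_iff]
      intro x hx y hy hx0 hy0
      exact huni x (List.mem_cons.mpr ((pv_mem_set_iff L i hiN x).mp hx))
        y (List.mem_cons.mpr ((pv_mem_set_iff L i hiN y).mp hy)) hx0 hy0

-- ---- A's early exits and core equal pvBVal ----

-- the positive entries of L
def pvK (L : List Int) : List Int := L.filter (fun v => v ≠ 0)

lemma pvK_mem (L : List Int) (x : Int) : x ∈ pvK L ↔ x ∈ L ∧ x ≠ 0 := by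
  unfold pvK; rw [List.mem_filter]; simp

lemma pvK_countP (L : List Int) : L.countP (fun v => v ≠ 0) = (pvK L).length :=
  List.countP_eq_length_filter ..

lemma pvK_sum (L : List Int) : (pvK L).sum = L.sum := by
  unfold pvK
  induction L with
  | nil => simp
  | cons a l ih =>
    by_cases h : a = 0
    · subst h; simpa using ih
    · rw [List.filter_cons_of_pos (by simpa using h), List.sum_cons, List.sum_cons, ih]

lemma pvK_count (L : List Int) (x : Int) (hx : x ≠ 0) : (pvK L).count x = L.count x := by
  unfold pvK
  rw [List.count_filter]
  simp [hx]

-- the distinct nonzero values of L, in first-occurrence order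
def pvV (L : List Int) : List Int := (PySem.Set.ofList L).filter (fun v => !(v == 0))

lemma pvV_mem (L : List Int) (x : Int) : x ∈ pvV L ↔ x ∈ L ∧ x ≠ 0 := by
  unfold pvV
  rw [List.mem_filter, PySem.Set.mem_ofList]
  simp

lemma pvV_nodup (L : List Int) : (pvV L).Nodup := (PySem.Set.nodup_ofList L).filter _

lemma pv_count_items (L : List Int) :
    ((PySem.Dict.counter L).erase 0).items
      = (pvV L).map (fun k => (k, (L.count k : Int))) := by
  show (((PySem.Dict.counter L).items).filter (fun p => !(p.1 == 0)))
      = (pvV L).map (fun k => (k, (L.count k : Int)))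
  rw [PySem.Dict.items_counter, List.filter_map]
  rfl

lemma pv_count_keys (L : List Int) :
    ((PySem.Dict.counter L).erase 0).keys = pvV L := by
  show (((PySem.Dict.counter L).erase 0).items).map (fun p => p.1) = pvV L
  rw [pv_count_items, List.map_map]
  exact List.map_id ..

lemma pv_count_size (L : List Int) :
    ((PySem.Dict.counter L).erase 0).size = (pvV L).length := by
  show (((PySem.Dict.counter L).erase 0).items).length = (pvV L).length
  rw [pv_count_items, List.length_map]

lemma pv_count_getD (L : List Int) (v : Int) (hv : v ∈ pvV L) :
    ((PySem.Dict.counter L).erase 0).getD v 0 = (L.count v : Int) := by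
  apply PySem.Dict.getD_of_mem_items
  · rw [pv_count_items]
    exact List.mem_map.mpr ⟨v, hv, rfl⟩
  · rw [pv_count_keys]
    exact pvV_nodup L
lemma pvCoreA_iff (L : List Int) (h0 : ∀ x ∈ L, 0 ≤ x)
    (he : ¬(L.countP (fun v => v ≠ 0) = 1 ∨ ((L.countP (fun v => v ≠ 0) : Int)) = L.sum)) :
    pvCoreA L = true ↔ pvBVal L := by
  rw [not_or] at he
  obtain ⟨he1, he2⟩ := he
  rw [pvK_countP] at he1 he2
  have hKmemV : ∀ x, x ∈ pvK L ↔ x ∈ pvV L := by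
    intro x; rw [pvK_mem, pvV_mem]
  unfold pvCoreA
  simp only [pv_count_size, pv_count_keys]
  rcases hV : pvV L with _ | ⟨a, _ | ⟨b, _ | ⟨c, t⟩⟩⟩
  · -- no nonzero value at all: L sums to 0, contradicting ¬(k = sum)
    exfalso
    have hKnil : pvK L = [] := by
      apply List.eq_nil_iff_forall_not_mem.mpr
      intro x hx
      have := (hKmemV x).mp hx
      rw [hV] at this
      simp at this
    rw [hKnil] at he2
    rw [← pvK_sum L, hKnil] at he2
    simp at he2
  · -- a single nonzero value a: k ≥ 2 equal counts, contradicting nothing, refuting pvBVal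
    rw [if_pos (by simp)]
    have haV : a ∈ pvV L := by rw [hV]; simp
    have ha := (pvV_mem L a).mp haV
    have ha1 : 1 ≤ a := by have := h0 a ha.1; rcases ha with ⟨_, h⟩; omega
    have hKa : ∀ x ∈ pvK L, x = a := by
      intro x hx
      have := (hKmemV x).mp hx
      rw [hV] at this
      simpa using this
    have hKrep : pvK L = List.replicate (pvK L).length a := List.eq_replicate_of_mem hKa
    have hcK : (pvK L).count a = (pvK L).length := by
      rw [List.count_eq_length]
      intro b hb
      exact (hKa b hb).symm
    have hLa : L.count a = (pvK L).length := by rw [← pvK_count L a ha.2, hcK]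
    have hk1 : 1 ≤ (pvK L).length :=
      List.length_pos_of_mem ((pvK_mem L a).mpr ha)
    have hsum : L.sum = ((pvK L).length : Int) * a := by
      rw [← pvK_sum L]
      conv_lhs => rw [hKrep]
      rw [List.sum_replicate, nsmul_eq_mul]
    have ha2 : 2 ≤ a := by
      rcases lt_or_ge a 2 with h | h
      · exfalso
        have haa : a = 1 := by omega
        rw [haa, mul_one] at hsum
        exact he2 hsum.symm
      · exact h
    have hk2 : 2 ≤ (pvK L).length := by omega
    constructor
    · intro h; cases h
    · rintro ⟨v, hvL, hv0, huni⟩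
      exfalso
      have hva : v = a := hKa v ((pvK_mem L v).mpr ⟨hvL, hv0⟩)
      subst hva
      have hmem_tail : v ∈ L.erase v := by
        apply List.count_pos_iff.mp
        rw [List.count_erase]
        simp only [beq_self_eq_true, if_pos]
        rw [hLa]
        omega
      have := huni (v - 1) (List.mem_cons_self ..) v (List.mem_cons_of_mem _ hmem_tail)
        (by omega) (by omega)
      omega
  · -- exactly two distinct nonzero values: A's case analysis vs the simulation
    rw [if_neg (by simp)]
    rw [PySem.List.min?_id_cons, PySem.List.max?_id_cons]
    simp only [List.foldl_cons, List.foldl_nil]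
    have hnd : a ≠ b := by
      have := pvV_nodup L
      rw [hV] at this
      simp only [List.nodup_cons] at this
      simpa using this.1
    have haV : a ∈ pvV L := by rw [hV]; simp
    have hbV : b ∈ pvV L := by rw [hV]; simp
    have ha := (pvV_mem L a).mp haV
    have hb := (pvV_mem L b).mp hbV
    have ha1 : 1 ≤ a := by have := h0 a ha.1; rcases ha with ⟨_, h⟩; omega
    have hb1 : 1 ≤ b := by have := h0 b hb.1; rcases hb with ⟨_, h⟩; omega
    have hcase : (min a b = a ∧ max a b = b) ∨ (min a b = b ∧ max a b = a) := by omega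
    -- facts about p := min a b, q := max a b
    have hpV : min a b ∈ pvV L := by rcases hcase with ⟨h1, _⟩ | ⟨h1, _⟩ <;> rw [h1] <;> assumption
    have hqV : max a b ∈ pvV L := by rcases hcase with ⟨_, h2⟩ | ⟨_, h2⟩ <;> rw [h2] <;> assumption
    have hp := (pvV_mem L _).mp hpV
    have hq := (pvV_mem L _).mp hqV
    have hpq : min a b < max a b := by omega
    have hp1 : 1 ≤ min a b := by omega
    have hmem2 : ∀ x ∈ L, x ≠ 0 → (x = min a b ∨ x = max a b) := by
      intro x hxL hx0
      have : x ∈ pvV L := (pvV_mem L x).mpr ⟨hxL, hx0⟩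
      rw [hV] at this
      rcases (by simpa using this : x = a ∨ x = b) with rfl | rfl <;> omega
    simp only [pv_count_getD L _ hpV, pv_count_getD L _ hqV]
    have hcp1 : 1 ≤ L.count (min a b) := List.count_pos_iff.mpr hp.1
    have hcq1 : 1 ≤ L.count (max a b) := List.count_pos_iff.mpr hq.1
    -- the chain of ifs is the disjunction of the two conditions
    have hifs : ∀ (c1 c2 : Prop) [Decidable c1] [Decidable c2],
        ((if c1 then true else if c2 then true else false) = true ↔ (c1 ∨ c2)) := by
      intro c1 c2 _ _
      by_cases h1 : c1
      · simp [h1]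
      · by_cases h2 : c2 <;> simp [h1, h2]
    rw [hifs]
    constructor
    · rintro (⟨hc1a, hc1b⟩ | ⟨hc2a, hc2b⟩)
      · -- min value 1 with multiplicity 1: remove that letter entirely
        have hpone : min a b = 1 := by rw [hc1a, hc1b]
        have hcnt : L.count (min a b) = 1 := by exact_mod_cast hc1b
        refine ⟨min a b, hp.1, by omega, ?_⟩
        have hz : ∀ z ∈ (min a b - 1) :: L.erase (min a b), z ≠ 0 → z = max a b := by
          intro z hzm hz0
          rcases List.mem_cons.mp hzm with rfl | hz'
          · omega
          · have hzL : z ∈ L := List.mem_of_mem_erase hz'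
            rcases hmem2 z hzL hz0 with heq | heq
            · exfalso
              rw [heq] at hz'
              have hpos : 0 < (L.erase (min a b)).count (min a b) :=
                List.count_pos_iff.mpr hz'
              rw [List.count_erase] at hpos
              simp [hcnt] at hpos
            · exact heq
        intro x hx y hy hx0 hy0
        rw [hz x hx hx0, hz y hy hy0]
      · -- max = min+1, multiplicity 1: remove one from the max letter
        have hcnt : L.count (max a b) = 1 := by exact_mod_cast hc2b
        refine ⟨max a b, hq.1, by omega, ?_⟩
        have hz : ∀ z ∈ (max a b - 1) :: L.erase (max a b), z ≠ 0 → z = min a b := by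
          intro z hzm hz0
          rcases List.mem_cons.mp hzm with rfl | hz'
          · omega
          · have hzL : z ∈ L := List.mem_of_mem_erase hz'
            rcases hmem2 z hzL hz0 with heq | heq
            · exact heq
            · exfalso
              rw [heq] at hz'
              have hpos : 0 < (L.erase (max a b)).count (max a b) :=
                List.count_pos_iff.mpr hz'
              rw [List.count_erase] at hpos
              simp [hcnt] at hpos
        intro x hx y hy hx0 hy0
        rw [hz x hx hx0, hz y hy hy0]
    · rintro ⟨v, hvL, hv0, huni⟩
      rcases hmem2 v hvL hv0 with rfl | rfl
      · -- v = min a b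
        left
        have hqe : max a b ∈ L.erase (min a b) :=
          (List.mem_erase_of_ne (by omega)).mpr hq.1
        have hpone : min a b = 1 := by
          by_contra hne
          have h2 : 2 ≤ min a b := by omega
          have := huni (min a b - 1) (List.mem_cons_self ..)
            (max a b) (List.mem_cons_of_mem _ hqe) (by omega) (by omega)
          omega
        have hcnt : L.count (min a b) = 1 := by
          by_contra hne
          have h2 : 2 ≤ L.count (min a b) := by omega
          have hpe : min a b ∈ L.erase (min a b) := by
            apply List.count_pos_iff.mp
            rw [List.count_erase]
            simp only [beq_self_eq_true, if_pos]
            omega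
          have := huni (min a b) (List.mem_cons_of_mem _ hpe)
            (max a b) (List.mem_cons_of_mem _ hqe) (by omega) (by omega)
          omega
        constructor
        · rw [hcnt, hpone]; norm_num
        · rw [hcnt]; norm_num
      · -- v = max a b
        right
        have hpe : min a b ∈ L.erase (max a b) :=
          (List.mem_erase_of_ne (by omega)).mpr hp.1
        have hdiff : max a b - min a b = 1 := by
          have := huni (max a b - 1) (List.mem_cons_self ..)
            (min a b) (List.mem_cons_of_mem _ hpe) (by omega) (by omega)
          omega
        have hcnt : L.count (max a b) = 1 := by
          by_contra hne
          have h2 : 2 ≤ L.count (max a b) := by omega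
          have hqe : max a b ∈ L.erase (max a b) := by
            apply List.count_pos_iff.mp
            rw [List.count_erase]
            simp only [beq_self_eq_true, if_pos]
            omega
          have := huni (max a b) (List.mem_cons_of_mem _ hqe)
            (min a b) (List.mem_cons_of_mem _ hpe) (by omega) (by omega)
          omega
        exact ⟨hdiff, by rw [hcnt]; norm_num⟩
  · -- at least three distinct nonzero values: both sides false
    rw [if_pos (by simp)]
    have hnd := pvV_nodup L
    rw [hV] at hnd
    simp only [List.nodup_cons, List.mem_cons] at hnd
    have hab : a ≠ b := by tauto
    have hac : a ≠ c := by tauto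
    have hbc : b ≠ c := by tauto
    have haV : a ∈ pvV L := by rw [hV]; simp
    have hbV : b ∈ pvV L := by rw [hV]; simp
    have hcV : c ∈ pvV L := by rw [hV]; simp
    have ha := (pvV_mem L a).mp haV
    have hb := (pvV_mem L b).mp hbV
    have hc := (pvV_mem L c).mp hcV
    constructor
    · intro h; cases h
    · rintro ⟨v, hvL, hv0, huni⟩
      exfalso
      have hpair : ∃ z w : Int, z ≠ w ∧ z ≠ v ∧ w ≠ v ∧ (z ∈ L ∧ z ≠ 0) ∧ (w ∈ L ∧ w ≠ 0) := by
        by_cases hva : v = a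
        · exact ⟨b, c, hbc, by rw [← hva] at hab; exact fun h => hab h.symm,
            by rw [← hva] at hac; exact fun h => hac h.symm, hb, hc⟩
        · by_cases hvb : v = b
          · exact ⟨a, c, hac, by rw [← hvb] at hab; exact hab,
              by rw [← hvb] at hbc; exact fun h => hbc h.symm, ha, hc⟩
          · exact ⟨a, b, hab, fun h => hva h.symm, fun h => hvb h.symm, ha, hb⟩
      obtain ⟨z, w, hzw, hzv, hwv, hz, hw⟩ := hpair
      have hze : z ∈ L.erase v := (List.mem_erase_of_ne hzv).mpr hz.1
      have hwe : w ∈ L.erase v := (List.mem_erase_of_ne hwv).mpr hw.1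
      exact hzw (huni z (List.mem_cons_of_mem _ hze) w (List.mem_cons_of_mem _ hwe) hz.2 hw.2)


-- ===== VERDICT (by name: the statement is the Claim_ definition above) =====
theorem equalFrequency_spec : Claim_equal_equalFrequency := by
  intro word _ hpre
  unfold Spec_equalFrequency equalFrequency equalFrequency_alt
  by_cases hw : word = ""
  · subst hw; decide
  · have hcne : word.toList ≠ [] := by simp [String.toList_eq_nil_iff, hw]
    obtain ⟨c0, hc0⟩ := List.exists_mem_of_ne_nil _ hcne
    have hk1 : 1 ≤ (PySem.Set.ofList word.toList).length :=
      List.length_pos_of_mem ((PySem.Set.mem_ofList _ c0).mpr hc0)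
    simp only [PySem.Set.len, PySem.Str.len]
    by_cases hearly : (((PySem.Set.ofList word.toList).length : Int) = 1 ∨
        ((PySem.Set.ofList word.toList).length : Int) = (word.toList.length : Int))
    · rw [if_pos hearly, if_pos (by
        rcases hearly with h | h
        · exact Or.inl (by omega)
        · exact Or.inr h)]
    · have hCB : ¬(((PySem.Set.ofList word.toList).length : Int) ≤ 1 ∨
          ((PySem.Set.ofList word.toList).length : Int) = (word.toList.length : Int)) := by
        rintro (h | h)
        · exact hearly (Or.inl (by omega))
        · exact hearly (Or.inr h)
      rw [if_neg hearly, if_neg hCB]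
      have hlow : ∀ c ∈ word.toList, 'a' ≤ c ∧ c ≤ 'z' := by
        rcases hpre with h | h | h
        · intro c hc
          have := List.all_eq_true.mp h c hc
          simpa using this
        · exact absurd (Or.inl (by omega)) hearly
        · exact absurd (Or.inr (by exact_mod_cast h)) hearly
      have h0 := pvFreq_nonneg word.toList hlow
      have hlen := pvFreq_length word.toList
      have hsum := pvFreq_sum word.toList hlow
      have hcnt := pvFreq_distinct word.toList hlow
      have he : ¬((pvFreq word.toList).countP (fun v => v ≠ 0) = 1 ∨
          (((pvFreq word.toList).countP (fun v => v ≠ 0) : Int)) = (pvFreq word.toList).sum) := by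
        rintro (h | h)
        · exact hearly (Or.inl (by rw [hcnt]; exact_mod_cast h))
        · exact hearly (Or.inr (by rw [hcnt]; rw [hsum] at h; exact h))
      rcases hA : pvCoreA (pvFreq word.toList) with _ | _
      · rcases hB : pvScan (pvFreq word.toList) (PySem.List.pyRange 0 26 1) with _ | _
        · rfl
        · exact absurd ((pvCoreA_iff _ h0 he).mpr ((pvScan_iff _ h0 hlen).mp hB)) (by simp [hA])
      · exact ((pvScan_iff _ h0 hlen).mpr ((pvCoreA_iff _ h0 he).mp hA)).symm
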